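-- pv_equiv track=rewrite | github.com/basarinan/DP_CS_Codee | Tools Files/Test_Cycle_2.py | removeAttribute
-- ===== SOURCE A (Python) =====
-- def removeAttribute(a, n):
--
--
-- 	result = []
-- 	ctr = 0;
-- 	for i in range(0, len(a),1):
--
-- 		if (ctr != n):
-- 			result.append(a[i])
--
-- 		ctr = ctr + 1
--
-- 		if (ctr == 4):
-- 			ctr = 0
--
--
--
--
-- 	return result
-- ===== SOURCE B (Python) =====
-- def removeAttribute(a, n):
--     if not (0 <= n < 4):
--         return list(a)
--     out = []
--     for i in range(0, len(a), 4):
--         chunk = a[i:i+4]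
--         out += chunk[:n] + chunk[n+1:]
--     return out
-- ===== Notes on version B (the rewrite author's own statement) =====
-- stated objective: simpler
-- what changed: B processes the list in chunks of 4 and drops the n-th element of each chunk via slicing, instead of A's per-element counter loop that resets at 4; when n is outside 0..3 B just copies the list.
import Mathlib
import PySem

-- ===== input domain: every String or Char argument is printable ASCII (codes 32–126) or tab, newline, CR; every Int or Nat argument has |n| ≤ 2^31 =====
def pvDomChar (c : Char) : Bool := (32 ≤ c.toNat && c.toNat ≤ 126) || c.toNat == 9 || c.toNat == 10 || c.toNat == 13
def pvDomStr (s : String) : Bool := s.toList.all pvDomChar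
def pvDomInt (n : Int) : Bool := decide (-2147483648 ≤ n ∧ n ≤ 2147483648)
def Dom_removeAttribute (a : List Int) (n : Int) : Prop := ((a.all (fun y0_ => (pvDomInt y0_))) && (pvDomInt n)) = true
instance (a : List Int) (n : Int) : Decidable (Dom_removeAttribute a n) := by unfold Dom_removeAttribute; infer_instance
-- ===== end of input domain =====

-- ===== PORT A =====
-- loop of A: result accumulator and a counter ctr that resets to 0 after 4
def removeAttributeGo (xs : List Int) (ctr n : Int) : List Int :=
  match xs with
  | [] => []
  | x :: rest =>
    let keep := ctr ≠ n
    let ctr' := if ctr + 1 = 4 then 0 else ctr + 1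
    if keep then x :: removeAttributeGo rest ctr' n
    else removeAttributeGo rest ctr' n

def removeAttribute (a : List Int) (n : Int) : List Int :=
  removeAttributeGo a 0 n

-- ===== PORT B =====
-- B's loop: take chunks of 4, drop the n-th element of each chunk (0 ≤ n < 4 guaranteed by caller)
def removeAttributeChunks (xs : List Int) (n : Int) : List Int :=
  match xs with
  | [] => []
  | x :: rest =>
    let chunk := (x :: rest).take 4
    (chunk.take n.toNat ++ chunk.drop (n.toNat + 1)) ++ removeAttributeChunks ((x :: rest).drop 4) n
termination_by xs.length
decreasing_by simp

def removeAttribute_alt (a : List Int) (n : Int) : List Int :=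
  if 0 ≤ n ∧ n < 4 then removeAttributeChunks a n else a

-- ===== PRECONDITION & SPEC =====
def Spec_removeAttribute (a : List Int) (n : Int) (out : List Int) : Prop := out = removeAttribute_alt a n
instance (a : List Int) (n : Int) (out : List Int) : Decidable (Spec_removeAttribute a n out) := by unfold Spec_removeAttribute; infer_instance

-- ===== CLAIM (what is proved, stated in full; the proofs are below) =====
def Claim_equal_removeAttribute : Prop := ∀ (a : List Int) (n : Int), Dom_removeAttribute a n → Spec_removeAttribute a n (removeAttribute a n)

-- ===== LEMMAS AND PROOFS =====

-- ===== VERDICT (by name: the statement is the Claim_ definition above) =====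
-- when n is outside 0..3, the counter (always in 0..3) never equals n, so A keeps everything
theorem goA_all (n : Int) (hn : n < 0 ∨ 4 ≤ n) :
    ∀ (xs : List Int) (ctr : Int), 0 ≤ ctr → ctr < 4 → removeAttributeGo xs ctr n = xs := by
  intro xs
  induction xs with
  | nil => intro ctr _ _; rfl
  | cons x rest ih =>
    intro ctr h0 h4
    have hne : ctr ≠ n := by omega
    simp only [removeAttributeGo]
    simp only [if_pos (show ctr ≠ n from hne), ne_eq]
    by_cases hc : ctr + 1 = 4
    · simp [hc, ih 0 (by omega) (by omega)]
    · simp [hc, ih (ctr + 1) (by omega) (by omega)]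

-- the chunked deletion agrees with A's counter loop when 0 ≤ n < 4
theorem chunks_eq (n : Int) (h0 : 0 ≤ n) (h4 : n < 4) :
    ∀ (k : Nat) (xs : List Int), xs.length ≤ k → removeAttributeChunks xs n = removeAttributeGo xs 0 n := by
  intro k
  induction k with
  | zero =>
    intro xs hl
    have : xs = [] := by cases xs <;> simp_all
    subst this; simp [removeAttributeChunks, removeAttributeGo]
  | succ k ih =>
    intro xs hl
    match xs with
    | [] => simp [removeAttributeChunks, removeAttributeGo]
    | [a] =>
      interval_cases n <;> simp [removeAttributeChunks, removeAttributeGo]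
    | [a, b] =>
      interval_cases n <;> simp [removeAttributeChunks, removeAttributeGo]
    | [a, b, c] =>
      interval_cases n <;> simp [removeAttributeChunks, removeAttributeGo]
    | a :: b :: c :: d :: rest =>
      have hr : rest.length ≤ k := by simp at hl; omega
      have ihr := ih rest hr
      interval_cases n <;>
        (rw [removeAttributeChunks.eq_def]; simp [removeAttributeGo, ihr])

theorem removeAttribute_spec : Claim_equal_removeAttribute := by
  intro a n _
  unfold Spec_removeAttribute removeAttribute removeAttribute_alt
  by_cases h : 0 ≤ n ∧ n < 4
  · rw [if_pos h, chunks_eq n h.1 h.2 a.length a le_rfl]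
  · rw [if_neg h, goA_all n (by omega) a 0 (by omega) (by omega)]
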